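-- pv_equiv track=rewrite | github.com/devyan0/Study_Algorithm_Python | 프로그래머스/미로탈출2.py | solution
-- ===== SOURCE A (Python) =====
-- from collections import deque
--
-- def solution(arg):
--     map = [[x for x in row] for row in arg]
--     ROW, COL = len(map), len(map[0])
--
--     dist_to = {'L': float('inf'), 'E': float('inf')}
--
--     def bfs(i, j, find):
--         q = deque([(i, j)])
--         visited = set()
--         dist = 0
--         while q:
--             for _ in range(len(q)):
--                 i, j = q.popleft()
--                 if map[i][j] == find:
--                     dist_to[find] = min(dist_to[find], dist)
--                     return
--                 for di, dj in [(-1, 0), (1, 0), (0, 1), (0, -1)]: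
--                     ni, nj = i + di, j + dj
--                     if not (0 <= ni < ROW and 0 <= nj < COL): continue
--                     if map[ni][nj] == 'X': continue
--                     if (ni, nj) in visited: continue
--
--                     visited.add((ni, nj))
--                     q.append((ni, nj))
--             dist += 1
--
--
--     for i in range(ROW):
--         for j in range(COL):
--             if map[i][j] == 'S':
--                 bfs(i, j, 'L')
--             if map[i][j] == 'L':
--                 bfs(i, j, 'E')
--
--     d = dist_to['L'] + dist_to['E']
--     return d if d < float('inf') else -1
-- ===== SOURCE B (Python) =====
-- def solution(arg):
--     R, C = len(arg), len(arg[0])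
--
--     def cells(ch):
--         return {(i, j) for i in range(R) for j in range(C) if arg[i][j] == ch}
--
--     def grow(reached):
--         return reached | {(ni, nj)
--                           for i, j in reached
--                           for ni, nj in ((i - 1, j), (i + 1, j), (i, j + 1), (i, j - 1))
--                           if 0 <= ni < R and 0 <= nj < C and arg[ni][nj] != 'X'}
--
--     def steps(src, dst):
--         reached, targets = cells(src), cells(dst)
--         d = 0
--         while True:
--             if reached & targets:
--                 return d
--             nxt = grow(reached)
--             if nxt == reached:
--                 return None
--             reached, d = nxt, d + 1
--
--     a, b = steps('S', 'L'), steps('L', 'E')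
--     return a + b if a is not None and b is not None else -1
-- ===== Notes on version B (the rewrite author's own statement) =====
-- stated objective: alternative
-- what changed: Replaces A's per-source level-synchronized BFS runs (deque, visited set, nonlocal dist_to dict, min over all S and all L cells) by one multi-source fixed-point reachability iteration per leg: the set of cells reachable from all sources is grown by whole-set expansion until it meets the target set (return the round count) or stops changing (return None).
import Mathlib
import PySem

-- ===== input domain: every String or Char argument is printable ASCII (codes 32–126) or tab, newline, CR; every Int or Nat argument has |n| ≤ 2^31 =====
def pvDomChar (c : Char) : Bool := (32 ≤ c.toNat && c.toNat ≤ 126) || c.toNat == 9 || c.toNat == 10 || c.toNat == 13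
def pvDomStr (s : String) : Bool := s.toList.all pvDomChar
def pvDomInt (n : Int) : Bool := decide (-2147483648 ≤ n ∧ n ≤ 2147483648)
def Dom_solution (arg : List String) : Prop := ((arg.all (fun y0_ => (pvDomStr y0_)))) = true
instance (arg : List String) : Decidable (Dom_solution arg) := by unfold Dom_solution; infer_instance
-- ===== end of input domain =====

-- B replaces A's per-source level-synchronized BFS runs (deque + visited + nonlocal dist dict,
-- min over sources) by one multi-source fixed-point reachability iteration per leg
-- (objective: alternative; same answers, different algorithm).

-- ===== PORT A =====
-- map[i][j]; the .getD defaults are never reached under Pre_solution (Python raises IndexError exactly there)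
def pvCellA (grid : List (List Char)) (i j : Int) : Char :=
  (PySem.List.pyGet? ((PySem.List.pyGet? grid i).getD []) j).getD ' '

-- body of A's inner 'for di, dj in [...]' loop; state = (queue, visited)
def pvStepA (grid : List (List Char)) (R C : Int) (i j : Int)
    (st : List (Int × Int) × PySem.Set (Int × Int)) (d : Int × Int) :
    List (Int × Int) × PySem.Set (Int × Int) :=
  let ni := i + d.1
  let nj := j + d.2
  if ¬ (0 ≤ ni ∧ ni < R ∧ 0 ≤ nj ∧ nj < C) then st
  else if pvCellA grid ni nj = 'X' then st
  else if (ni, nj) ∈ st.2 then st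
  else (st.1 ++ [(ni, nj)], PySem.Set.add st.2 (ni, nj))

-- A's 'for _ in range(len(q))' level loop; none = the early 'return' (target popped)
def pvLevelA (grid : List (List Char)) (R C : Int) (find : Char) :
    Nat → List (Int × Int) → PySem.Set (Int × Int) →
    Option (List (Int × Int) × PySem.Set (Int × Int))
  | 0, q, vis => some (q, vis)
  | _ + 1, [], vis => some ([], vis)   -- unreachable: the counter starts as len(q)
  | n + 1, (i, j) :: rest, vis =>
    if pvCellA grid i j = find then none
    else
      let st := [((-1 : Int), (0 : Int)), (1, 0), (0, 1), (0, -1)].foldl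
        (pvStepA grid R C i j) (rest, vis)
      pvLevelA grid R C find n st.1 st.2

-- min(dist_to[find], dist); none represents float('inf') (A keeps it only as a sentinel, never returns it)
def pvMinO : Option Int → Option Int → Option Int
  | none, b => b
  | some a, none => some a
  | some a, some b => some (min a b)

-- A's 'while q' loop; acc = dist_to[find] (none = float('inf')); fuel = R*C+2 bounds the number of
-- levels, which Python's loop never exceeds (each level consumes ≥ 1 of the ≤ R*C+1 ever-enqueued cells)
def pvBfsA (grid : List (List Char)) (R C : Int) (find : Char) :
    Nat → List (Int × Int) → PySem.Set (Int × Int) → Int → Option Int → Option Int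
  | 0, _, _, _, acc => acc
  | fuel + 1, q, vis, dist, acc =>
    if q = [] then acc
    else
      match pvLevelA grid R C find q.length q vis with
      | none => pvMinO acc (some dist)
      | some st => pvBfsA grid R C find fuel st.1 st.2 (dist + 1) acc

def solution (arg : List String) : Int :=
  let grid := arg.map (·.toList)
  let R : Int := grid.length
  let C : Int := (((PySem.List.pyGet? grid 0).getD []).length : Int)
  let fuel := (R * C).toNat + 2
  let distTo :=
    (PySem.List.pyRange 0 R 1).foldl (fun dt i =>
      (PySem.List.pyRange 0 C 1).foldl (fun dt j =>
        let dt := if pvCellA grid i j = 'S' then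
          (pvBfsA grid R C 'L' fuel [(i, j)] [] 0 dt.1, dt.2) else dt
        let dt := if pvCellA grid i j = 'L' then
          (dt.1, pvBfsA grid R C 'E' fuel [(i, j)] [] 0 dt.2) else dt
        dt) dt) ((none, none) : Option Int × Option Int)
  match distTo with
  | (some dl, some de) => dl + de
  | _ => -1

-- ===== PORT B =====
-- arg[i][j]; the .getD defaults are never reached under Pre_solution (Python raises IndexError exactly there)
def pvCellB (arg : List String) (i j : Int) : Char :=
  (PySem.Str.pyGet? ((PySem.List.pyGet? arg i).getD "") j).getD ' '

-- B's cells(ch): the set comprehension over the grid scan (row by row)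
def pvCellsRowB (arg : List String) (C : Int) (ch : Char)
    (s : PySem.Set (Int × Int)) (i : Int) : PySem.Set (Int × Int) :=
  (PySem.List.pyRange 0 C 1).foldl (fun s j =>
    if pvCellB arg i j = ch then PySem.Set.add s (i, j) else s) s

def pvCellsB (arg : List String) (R C : Int) (ch : Char) : PySem.Set (Int × Int) :=
  (PySem.List.pyRange 0 R 1).foldl (pvCellsRowB arg C ch) []

-- B's grow(reached): reached | {in-bounds non-X neighbours of reached}
def pvGrowStepB (arg : List String) (R C : Int)
    (s : PySem.Set (Int × Int)) (p : Int × Int) : PySem.Set (Int × Int) :=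
  [(p.1 - 1, p.2), (p.1 + 1, p.2), (p.1, p.2 + 1), (p.1, p.2 - 1)].foldl (fun s q =>
    if 0 ≤ q.1 ∧ q.1 < R ∧ 0 ≤ q.2 ∧ q.2 < C ∧ pvCellB arg q.1 q.2 ≠ 'X'
    then PySem.Set.add s q else s) s

def pvGrowB (arg : List String) (R C : Int) (reached : PySem.Set (Int × Int)) :
    PySem.Set (Int × Int) :=
  reached.foldl (pvGrowStepB arg R C) reached

-- B's 'while True' loop in steps(); fuel = R*C+2 is never exhausted by the Python
-- (each non-returning round adds at least one of the ≤ R*C grid cells to reached)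
def pvLoopB (arg : List String) (R C : Int) (targets : PySem.Set (Int × Int)) :
    Nat → PySem.Set (Int × Int) → Int → Option Int
  | 0, _, _ => none
  | n + 1, reached, d =>
    if PySem.Set.inter reached targets ≠ [] then some d
    else
      let nxt := pvGrowB arg R C reached
      if PySem.Set.equal nxt reached then none
      else pvLoopB arg R C targets n nxt (d + 1)

-- B's steps(src, dst)
def pvStepsB (arg : List String) (R C : Int) (fuel : Nat) (src dst : Char) : Option Int :=
  pvLoopB arg R C (pvCellsB arg R C dst) fuel (pvCellsB arg R C src) 0

def solution_alt (arg : List String) : Int :=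
  let R : Int := arg.length
  let C : Int := PySem.Str.len ((PySem.List.pyGet? arg 0).getD "")
  let fuel := (R * C).toNat + 2
  let a := pvStepsB arg R C fuel 'S' 'L'
  let b := pvStepsB arg R C fuel 'L' 'E'
  -- 'a + b if a is not None and b is not None else -1'; the .getD defaults are unreachable
  if a.isSome && b.isSome then a.getD 0 + b.getD 0 else -1

-- ===== PRECONDITION & SPEC =====
-- Pre_ excludes exactly the inputs where Python A raises IndexError: the empty list (map[0])
-- and grids with some row shorter than the first row (map[i][j] for j < COL).
def Pre_solution (arg : List String) : Prop :=
  arg ≠ [] ∧ ∀ s ∈ arg, PySem.Str.len (arg.headD "") ≤ PySem.Str.len s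
instance (arg : List String) : Decidable (Pre_solution arg) := by unfold Pre_solution; infer_instance

def pvWitness_solution : List String := ["S.L", "XXE"]

def Spec_solution (arg : List String) (out : Int) : Prop := out = solution_alt arg
instance (arg : List String) (out : Int) : Decidable (Spec_solution arg out) := by unfold Spec_solution; infer_instance

-- ===== CLAIM (what is proved, stated in full; the proofs are below) =====
def Claim_equal_solution : Prop := ∀ (arg : List String), Dom_solution arg → Pre_solution arg → Spec_solution arg (solution arg)

-- ===== LEMMAS AND PROOFS =====

-- ---- proof-layer bridge for A: frontier-by-levels BFS with a visited set ----

def pvNbrs (p : Int × Int) : List (Int × Int) :=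
  [(p.1 - 1, p.2), (p.1 + 1, p.2), (p.1, p.2 + 1), (p.1, p.2 - 1)]

def pvStepF (arg : List String) (R C : Int)
    (st : List (Int × Int) × PySem.Set (Int × Int)) (p : Int × Int) :
    List (Int × Int) × PySem.Set (Int × Int) :=
  if 0 ≤ p.1 ∧ p.1 < R ∧ 0 ≤ p.2 ∧ p.2 < C ∧ pvCellB arg p.1 p.2 ≠ 'X' ∧ p ∉ st.2
  then (st.1 ++ [p], PySem.Set.add st.2 p)
  else st

def pvExpandF (arg : List String) (R C : Int)
    (st : List (Int × Int) × PySem.Set (Int × Int)) (p : Int × Int) :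
    List (Int × Int) × PySem.Set (Int × Int) :=
  (pvNbrs p).foldl (pvStepF arg R C) st

def pvFrontA (arg : List String) (R C : Int) (target : Char) :
    Nat → List (Int × Int) → PySem.Set (Int × Int) → Int → Option Int
  | 0, _, _, _ => none
  | fuel + 1, frontier, seen, d =>
    if frontier = [] then none
    else if frontier.any (fun p => pvCellB arg p.1 p.2 == target) then some d
    else
      let st := frontier.foldl (pvExpandF arg R C) ([], seen)
      pvFrontA arg R C target fuel st.1 st.2 (d + 1)

theorem pyGet?_map_toList (l : List String) (i : Int) :
    PySem.List.pyGet? (l.map (·.toList)) i = (PySem.List.pyGet? l i).map (·.toList) := by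
  simp [PySem.List.pyGet?, PySem.List.pyIdx?]

theorem pvCell_eq (arg : List String) (i j : Int) :
    pvCellA (arg.map (·.toList)) i j = pvCellB arg i j := by
  simp only [pvCellA, pvCellB, pyGet?_map_toList, PySem.Str.pyGet?,
    PySem.Chars.pyGet?_eq_listPyGet?]
  cases PySem.List.pyGet? arg i <;> simp

theorem pvStep_eq (arg : List String) (R C i j : Int)
    (st : List (Int × Int) × PySem.Set (Int × Int)) (d : Int × Int) :
    pvStepA (arg.map (·.toList)) R C i j st d = pvStepF arg R C st (i + d.1, j + d.2) := by
  simp only [pvStepA, pvStepF, pvCell_eq]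
  split_ifs <;> tauto

theorem pvExpand_eq (arg : List String) (R C i j : Int)
    (st : List (Int × Int) × PySem.Set (Int × Int)) :
    [((-1 : Int), (0 : Int)), (1, 0), (0, 1), (0, -1)].foldl
      (pvStepA (arg.map (·.toList)) R C i j) st = pvExpandF arg R C st (i, j) := by
  simp only [pvExpandF, pvNbrs, List.foldl, pvStep_eq]
  norm_num [show i + (-1 : Int) = i - 1 from by ring, show j + (-1 : Int) = j - 1 from by ring]

theorem pvExpand_eq' (arg : List String) (R C i j : Int)
    (st : List (Int × Int) × PySem.Set (Int × Int)) :
    pvStepA (arg.map (·.toList)) R C i j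
      (pvStepA (arg.map (·.toList)) R C i j
        (pvStepA (arg.map (·.toList)) R C i j
          (pvStepA (arg.map (·.toList)) R C i j st (-1, 0)) (1, 0)) (0, 1)) (0, -1)
      = pvExpandF arg R C st (i, j) := by
  simpa [List.foldl] using pvExpand_eq arg R C i j st

theorem pvStepF_append (arg : List String) (R C : Int) (a b : List (Int × Int))
    (v : PySem.Set (Int × Int)) (p : Int × Int) :
    pvStepF arg R C (a ++ b, v) p
      = (a ++ (pvStepF arg R C (b, v) p).1, (pvStepF arg R C (b, v) p).2) := by
  simp only [pvStepF]
  split_ifs <;> simp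

theorem pvFoldStepF_append (arg : List String) (R C : Int) (L : List (Int × Int))
    (a b : List (Int × Int)) (v : PySem.Set (Int × Int)) :
    L.foldl (pvStepF arg R C) (a ++ b, v)
      = (a ++ (L.foldl (pvStepF arg R C) (b, v)).1, (L.foldl (pvStepF arg R C) (b, v)).2) := by
  induction L generalizing b v with
  | nil => simp
  | cons p L ih =>
    simp only [List.foldl_cons, pvStepF_append]
    rw [ih]

theorem pvExpandF_append (arg : List String) (R C : Int) (a b : List (Int × Int))
    (v : PySem.Set (Int × Int)) (p : Int × Int) :
    pvExpandF arg R C (a ++ b, v) p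
      = (a ++ (pvExpandF arg R C (b, v) p).1, (pvExpandF arg R C (b, v) p).2) := by
  simp only [pvExpandF, pvFoldStepF_append]

theorem pvFoldExpandF_append (arg : List String) (R C : Int) (cells : List (Int × Int))
    (a b : List (Int × Int)) (v : PySem.Set (Int × Int)) :
    cells.foldl (pvExpandF arg R C) (a ++ b, v)
      = (a ++ (cells.foldl (pvExpandF arg R C) (b, v)).1,
         (cells.foldl (pvExpandF arg R C) (b, v)).2) := by
  induction cells generalizing b v with
  | nil => simp
  | cons p cells ih =>
    simp only [List.foldl_cons, pvExpandF_append]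
    rw [ih]

theorem pvLevel_eq (arg : List String) (R C : Int) (find : Char) (n : Nat)
    (q : List (Int × Int)) (vis : PySem.Set (Int × Int)) (h : n ≤ q.length) :
    pvLevelA (arg.map (·.toList)) R C find n q vis
      = if (q.take n).any (fun p => pvCellB arg p.1 p.2 == find) then none
        else some (q.drop n ++ ((q.take n).foldl (pvExpandF arg R C) ([], vis)).1,
                   ((q.take n).foldl (pvExpandF arg R C) ([], vis)).2) := by
  induction n generalizing q vis with
  | zero => simp [pvLevelA]
  | succ n ih =>
    match q with
    | [] => simp at h
    | (i, j) :: rest =>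
      simp only [List.length_cons, Nat.add_le_add_iff_right] at h
      simp only [pvLevelA, pvCell_eq, List.take_succ_cons, List.drop_succ_cons,
        List.any_cons]
      by_cases hf : pvCellB arg i j = find
      · simp [hf]
      · simp only [hf, if_false, List.foldl_cons, List.foldl_nil]
        rw [pvExpand_eq']
        have hst : pvExpandF arg R C (rest, vis) (i, j)
            = (rest ++ (pvExpandF arg R C ([], vis) (i, j)).1,
               (pvExpandF arg R C ([], vis) (i, j)).2) := by
          conv_lhs => rw [show rest = rest ++ ([] : List (Int × Int)) from (List.append_nil rest).symm]
          exact pvExpandF_append arg R C rest [] vis (i, j)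
        set new := (pvExpandF arg R C ([], vis) (i, j)).1 with hnew
        set vis' := (pvExpandF arg R C ([], vis) (i, j)).2 with hvis'
        rw [hst]
        rw [ih (rest ++ new) vis' (by simpa using Nat.le_add_right_of_le h)]
        rw [List.take_append_of_le_length h, List.drop_append_of_le_length h]
        have hfold : (rest.take n).foldl (pvExpandF arg R C) (new, vis')
            = (new ++ ((rest.take n).foldl (pvExpandF arg R C) ([], vis')).1,
               ((rest.take n).foldl (pvExpandF arg R C) ([], vis')).2) := by
          conv_lhs => rw [show new = new ++ ([] : List (Int × Int)) from (List.append_nil new).symm]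
          exact pvFoldExpandF_append arg R C (rest.take n) new [] vis'
        rw [show pvExpandF arg R C ([], vis) (i, j) = (new, vis') from rfl, hfold]
        by_cases ha : (rest.take n).any (fun p => pvCellB arg p.1 p.2 == find)
        · simp [ha]
        · simp [ha, List.append_assoc, hf]

theorem pvBfs_eq (arg : List String) (R C : Int) (find : Char) (fuel : Nat)
    (q : List (Int × Int)) (vis : PySem.Set (Int × Int)) (dist : Int) (acc : Option Int) :
    pvBfsA (arg.map (·.toList)) R C find fuel q vis dist acc
      = match pvFrontA arg R C find fuel q vis dist with
        | some d => pvMinO acc (some d)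
        | none => acc := by
  induction fuel generalizing q vis dist with
  | zero => simp [pvBfsA, pvFrontA]
  | succ fuel ih =>
    simp only [pvBfsA, pvFrontA]
    by_cases hq : q = []
    · simp [hq]
    · simp only [hq, if_false]
      rw [pvLevel_eq arg R C find q.length q vis (le_refl _)]
      simp only [List.take_length, List.drop_length, List.nil_append]
      by_cases ha : q.any (fun p => pvCellB arg p.1 p.2 == find)
      · simp [ha]
      · simp only [ha]
        exact ih _ _ _

theorem pvBfs_eq' (arg : List String) (R C : Int) (find : Char) (fuel : Nat)
    (q : List (Int × Int)) (vis : PySem.Set (Int × Int)) (dist : Int) (acc : Option Int) :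
    pvBfsA (arg.map (·.toList)) R C find fuel q vis dist acc
      = pvMinO acc (pvFrontA arg R C find fuel q vis dist) := by
  rw [pvBfs_eq]
  cases pvFrontA arg R C find fuel q vis dist <;> cases acc <;> simp [pvMinO]

-- ---- the common mathematical yardstick: reachable-within-k sets and first hit level ----

def pvOkB (arg : List String) (R C : Int) (p : Int × Int) : Bool :=
  decide (0 ≤ p.1 ∧ p.1 < R ∧ 0 ≤ p.2 ∧ p.2 < C ∧ pvCellB arg p.1 p.2 ≠ 'X')

def pvReach (arg : List String) (R C : Int) (S : List (Int × Int)) :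
    Nat → (Int × Int) → Bool
  | 0, p => decide (p ∈ S)
  | k + 1, p =>
    pvReach arg R C S k p ||
      (pvOkB arg R C p && (pvNbrs p).any (fun q => pvReach arg R C S k q))

def pvHit (arg : List String) (R C : Int) (t : Char) (S : List (Int × Int)) (k : Nat) : Bool :=
  (pvCellsB arg R C t).any (fun p => pvReach arg R C S k p)

def pvFH (arg : List String) (R C : Int) (t : Char) (S : List (Int × Int)) :
    Nat → Nat → Option Int
  | _, 0 => none
  | k, n + 1 =>
    if pvHit arg R C t S k then some (k : Int) else pvFH arg R C t S (k + 1) n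

theorem pvNbrs_symm (p q : Int × Int) : p ∈ pvNbrs q ↔ q ∈ pvNbrs p := by
  simp [pvNbrs, Prod.ext_iff]
  omega

theorem pvReach_mono (arg : List String) (R C : Int) (S : List (Int × Int)) (k : Nat)
    (p : Int × Int) (h : pvReach arg R C S k p = true) :
    pvReach arg R C S (k + 1) p = true := by
  simp [pvReach, h]

theorem pvReach_step_iff (arg : List String) (R C : Int) (S : List (Int × Int)) (k : Nat)
    (p : Int × Int) :
    pvReach arg R C S (k + 1) p = true
      ↔ pvReach arg R C S k p = true ∨
        (pvOkB arg R C p = true ∧ ∃ q ∈ pvNbrs p, pvReach arg R C S k q = true) := by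
  simp [pvReach, List.any_eq_true]

theorem pvReach_inGrid (arg : List String) (R C : Int) (S : List (Int × Int))
    (hS : ∀ p ∈ S, 0 ≤ p.1 ∧ p.1 < R ∧ 0 ≤ p.2 ∧ p.2 < C) (k : Nat) (p : Int × Int)
    (h : pvReach arg R C S k p = true) : 0 ≤ p.1 ∧ p.1 < R ∧ 0 ≤ p.2 ∧ p.2 < C := by
  induction k generalizing p with
  | zero => simp [pvReach] at h; exact hS p h
  | succ k ih =>
    rcases (pvReach_step_iff arg R C S k p).1 h with h | ⟨hok, _⟩
    · exact ih p h
    · simp [pvOkB] at hok; tauto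

theorem pvReach_congr (arg : List String) (R C : Int) (S1 S2 : List (Int × Int))
    (h : ∀ p, p ∈ S1 ↔ p ∈ S2) (k : Nat) :
    pvReach arg R C S1 k = pvReach arg R C S2 k := by
  induction k with
  | zero => funext p; simp [pvReach, h p]
  | succ k ih => funext p; simp [pvReach, ih]

theorem pv_any_or {α : Type} (l : List α) (f g : α → Bool) :
    (l.any fun x => f x || g x) = (l.any f || l.any g) := by
  induction l with
  | nil => rfl
  | cons x l ih =>
    simp only [List.any_cons, ih]
    cases f x <;> cases g x <;> cases l.any f <;> cases l.any g <;> rfl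

theorem pvReach_append (arg : List String) (R C : Int) (S1 S2 : List (Int × Int)) (k : Nat)
    (p : Int × Int) :
    pvReach arg R C (S1 ++ S2) k p
      = (pvReach arg R C S1 k p || pvReach arg R C S2 k p) := by
  induction k generalizing p with
  | zero =>
    simp only [pvReach, List.mem_append]
    cases h1 : decide (p ∈ S1) <;> cases h2 : decide (p ∈ S2) <;>
      simp_all <;> tauto
  | succ k ih =>
    have hfun : (fun q => pvReach arg R C (S1 ++ S2) k q)
        = (fun q => pvReach arg R C S1 k q || pvReach arg R C S2 k q) := funext ih
    simp only [pvReach, hfun, pv_any_or]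
    cases h1 : pvReach arg R C S1 k p <;> cases h2 : pvReach arg R C S2 k p <;>
      cases hok : pvOkB arg R C p <;>
      cases hA : (pvNbrs p).any (fun q => pvReach arg R C S1 k q) <;>
      cases hB : (pvNbrs p).any (fun q => pvReach arg R C S2 k q) <;> rfl

theorem pvReach_nil (arg : List String) (R C : Int) (k : Nat) (p : Int × Int) :
    pvReach arg R C [] k p = false := by
  induction k generalizing p with
  | zero => simp [pvReach]
  | succ k ih => simp [pvReach, ih, List.any_eq_true]

theorem pvReach_stable (arg : List String) (R C : Int) (S : List (Int × Int)) (k : Nat)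
    (hst : ∀ p, pvReach arg R C S (k + 1) p = pvReach arg R C S k p) (m : Nat) :
    ∀ p, pvReach arg R C S (k + m) p = pvReach arg R C S k p := by
  induction m with
  | zero => intro p; rfl
  | succ m ih =>
    have hfun : pvReach arg R C S (k + m) = pvReach arg R C S k := funext ih
    intro p
    have h1 : pvReach arg R C S (k + (m + 1)) p = pvReach arg R C S (k + 1) p := by
      show pvReach arg R C S ((k + m) + 1) p = pvReach arg R C S (k + 1) p
      simp only [pvReach, hfun]
    rw [h1]
    exact hst p

theorem pvHit_congr_reach (arg : List String) (R C : Int) (t : Char)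
    (S : List (Int × Int)) (j k : Nat)
    (h : ∀ p, pvReach arg R C S j p = pvReach arg R C S k p) :
    pvHit arg R C t S j = pvHit arg R C t S k := by
  unfold pvHit
  congr 1
  exact funext h

theorem pvFH_none_of_nohit (arg : List String) (R C : Int) (t : Char)
    (S : List (Int × Int)) :
    ∀ (n k : Nat), (∀ j, k ≤ j → pvHit arg R C t S j = false) →
      pvFH arg R C t S k n = none := by
  intro n
  induction n with
  | zero => intro k _; rfl
  | succ n ih =>
    intro k h
    simp only [pvFH, h k (le_refl k), if_false]
    exact ih (k + 1) (fun j hj => h j (by omega))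

theorem pvFH_none_of_stable (arg : List String) (R C : Int) (t : Char)
    (S : List (Int × Int)) (k : Nat)
    (hst : ∀ p, pvReach arg R C S (k + 1) p = pvReach arg R C S k p)
    (hnohit : pvHit arg R C t S k = false) (n : Nat) :
    pvFH arg R C t S k n = none := by
  apply pvFH_none_of_nohit
  intro j hj
  obtain ⟨m, rfl⟩ := Nat.exists_eq_add_of_le hj
  rw [pvHit_congr_reach arg R C t S (k + m) k (pvReach_stable arg R C S k hst m)]
  exact hnohit

theorem pvFH_ge (arg : List String) (R C : Int) (t : Char) (S : List (Int × Int)) :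
    ∀ (n k : Nat) (d : Int), pvFH arg R C t S k n = some d → (k : Int) ≤ d := by
  intro n
  induction n with
  | zero => intro k d h; simp [pvFH] at h
  | succ n ih =>
    intro k d h
    simp only [pvFH] at h
    split_ifs at h with hh
    · simp only [Option.some.injEq] at h
      omega
    · have := ih (k + 1) d h
      push_cast at this ⊢
      omega

theorem pvHit_append (arg : List String) (R C : Int) (t : Char)
    (S1 S2 : List (Int × Int)) (k : Nat) :
    pvHit arg R C t (S1 ++ S2) k = (pvHit arg R C t S1 k || pvHit arg R C t S2 k) := by
  unfold pvHit
  have hfun : (fun p => pvReach arg R C (S1 ++ S2) k p)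
      = (fun p => pvReach arg R C S1 k p || pvReach arg R C S2 k p) :=
    funext (pvReach_append arg R C S1 S2 k)
  rw [hfun, pv_any_or]

theorem pvFH_append (arg : List String) (R C : Int) (t : Char)
    (S1 S2 : List (Int × Int)) :
    ∀ (n k : Nat), pvFH arg R C t (S1 ++ S2) k n
      = pvMinO (pvFH arg R C t S1 k n) (pvFH arg R C t S2 k n) := by
  intro n
  induction n with
  | zero => intro k; rfl
  | succ n ih =>
    intro k
    simp only [pvFH, pvHit_append]
    by_cases h1 : pvHit arg R C t S1 k = true
    · simp only [h1, Bool.true_or, if_true]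
      by_cases h2 : pvHit arg R C t S2 k = true
      · simp [h2, pvMinO]
      · simp only [Bool.not_eq_true] at h2
        simp only [h2, if_false]
        cases h : pvFH arg R C t S2 (k + 1) n with
        | none => simp [pvMinO]
        | some d =>
          have := pvFH_ge arg R C t S2 (n) (k + 1) d h
          simp only [pvMinO]
          congr 1
          push_cast at this
          omega
    · simp only [Bool.not_eq_true] at h1
      simp only [h1, Bool.false_or]
      by_cases h2 : pvHit arg R C t S2 k = true
      · simp only [h2, if_true]
        cases h : pvFH arg R C t S1 (k + 1) n with
        | none => simp [pvMinO]
        | some d =>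
          have := pvFH_ge arg R C t S1 (n) (k + 1) d h
          simp only [pvMinO]
          congr 1
          push_cast at this
          omega
      · simp only [Bool.not_eq_true] at h2
        simp only [h2, if_false]
        exact ih (k + 1)

theorem pvFH_congr (arg : List String) (R C : Int) (t : Char) (S1 S2 : List (Int × Int))
    (h : ∀ p, p ∈ S1 ↔ p ∈ S2) (n k : Nat) :
    pvFH arg R C t S1 k n = pvFH arg R C t S2 k n := by
  induction n generalizing k with
  | zero => rfl
  | succ n ih =>
    simp only [pvFH, pvHit, pvReach_congr arg R C S1 S2 h k]
    split_ifs with hh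
    · rfl
    · exact ih (k + 1)

theorem pvMinO_assoc (a b c : Option Int) :
    pvMinO (pvMinO a b) c = pvMinO a (pvMinO b c) := by
  cases a <;> cases b <;> cases c <;> simp [pvMinO, min_assoc]

theorem pvMinO_none_right (a : Option Int) : pvMinO a none = a := by
  cases a <;> rfl

-- ---- membership characterizations of the set folds ----

theorem mem_foldl_ite_add {β : Type} (l : List β) (c : β → Prop) [DecidablePred c]
    (g : β → Int × Int) (p : Int × Int) :
    ∀ s0 : PySem.Set (Int × Int),
      p ∈ l.foldl (fun s x => if c x then PySem.Set.add s (g x) else s) s0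
        ↔ p ∈ s0 ∨ ∃ x ∈ l, c x ∧ p = g x := by
  induction l with
  | nil => simp
  | cons x l ih =>
    intro s0
    simp only [List.foldl_cons]
    by_cases hc : c x
    · rw [if_pos hc, ih]
      simp [PySem.Set.mem_add]
      tauto
    · rw [if_neg hc, ih]
      simp
      tauto

theorem mem_foldl_ite_add_id (l : List (Int × Int)) (c : Int × Int → Prop)
    [DecidablePred c] (p : Int × Int) :
    ∀ s0 : PySem.Set (Int × Int),
      p ∈ l.foldl (fun s x => if c x then PySem.Set.add s x else s) s0
        ↔ p ∈ s0 ∨ ∃ x ∈ l, c x ∧ p = x := by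
  induction l with
  | nil => simp
  | cons x l ih =>
    intro s0
    simp only [List.foldl_cons]
    by_cases hc : c x
    · rw [if_pos hc, ih]
      simp only [PySem.Set.mem_add, List.mem_cons]
      constructor
      · rintro ((h | hpx) | ⟨x', hx', hcx, hpx⟩)
        · exact Or.inl h
        · exact Or.inr ⟨x, Or.inl rfl, hc, hpx⟩
        · exact Or.inr ⟨x', Or.inr hx', hcx, hpx⟩
      · rintro (h | ⟨x', hx' | hx', hcx, hpx⟩)
        · exact Or.inl (Or.inl h)
        · subst hx'; exact Or.inl (Or.inr hpx)
        · exact Or.inr ⟨x', hx', hcx, hpx⟩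
    · rw [if_neg hc, ih]
      simp only [List.mem_cons]
      constructor
      · rintro (h | ⟨x', hx', hcx, hpx⟩)
        · exact Or.inl h
        · exact Or.inr ⟨x', Or.inr hx', hcx, hpx⟩
      · rintro (h | ⟨x', hx' | hx', hcx, hpx⟩)
        · exact Or.inl h
        · subst hx'; exact absurd hcx hc
        · exact Or.inr ⟨x', hx', hcx, hpx⟩

theorem mem_cellsRow (arg : List String) (C : Int) (ch : Char)
    (s0 : PySem.Set (Int × Int)) (i : Int) (p : Int × Int) :
    p ∈ pvCellsRowB arg C ch s0 i
      ↔ p ∈ s0 ∨ ∃ j, (0 ≤ j ∧ j < C) ∧ pvCellB arg i j = ch ∧ p = (i, j) := by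
  unfold pvCellsRowB
  rw [mem_foldl_ite_add (c := fun j => pvCellB arg i j = ch) (g := fun j => ((i : Int), j))]
  simp [PySem.List.mem_pyRange_one]

theorem mem_cells (arg : List String) (R C : Int) (ch : Char) (p : Int × Int) :
    p ∈ pvCellsB arg R C ch
      ↔ 0 ≤ p.1 ∧ p.1 < R ∧ 0 ≤ p.2 ∧ p.2 < C ∧ pvCellB arg p.1 p.2 = ch := by
  have aux : ∀ (li : List Int) (s0 : PySem.Set (Int × Int)),
      p ∈ li.foldl (pvCellsRowB arg C ch) s0
        ↔ p ∈ s0 ∨ ∃ i ∈ li, ∃ j, (0 ≤ j ∧ j < C) ∧ pvCellB arg i j = ch ∧ p = (i, j) := by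
    intro li
    induction li with
    | nil => simp
    | cons i li ih =>
      intro s0
      simp only [List.foldl_cons]
      rw [ih, mem_cellsRow]
      simp only [List.mem_cons]
      constructor
      · rintro ((h | hj) | ⟨i', hi', hj⟩)
        · exact Or.inl h
        · exact Or.inr ⟨i, Or.inl rfl, hj⟩
        · exact Or.inr ⟨i', Or.inr hi', hj⟩
      · rintro (h | ⟨i', hi' | hi', hj⟩)
        · exact Or.inl (Or.inl h)
        · subst hi'; exact Or.inl (Or.inr hj)
        · exact Or.inr ⟨i', hi', hj⟩
  unfold pvCellsB
  rw [aux]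
  simp only [List.not_mem_nil, false_or, PySem.List.mem_pyRange_one]
  constructor
  · rintro ⟨i, hi, j, hj, hc, rfl⟩
    exact ⟨hi.1, hi.2, hj.1, hj.2, hc⟩
  · rintro ⟨h1, h2, h3, h4, h5⟩
    exact ⟨p.1, ⟨h1, h2⟩, p.2, ⟨h3, h4⟩, h5, rfl⟩

theorem mem_growStep (arg : List String) (R C : Int) (s0 : PySem.Set (Int × Int))
    (q : Int × Int) (p : Int × Int) :
    p ∈ pvGrowStepB arg R C s0 q
      ↔ p ∈ s0 ∨ (p ∈ pvNbrs q ∧ pvOkB arg R C p = true) := by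
  unfold pvGrowStepB
  rw [mem_foldl_ite_add_id (c := fun r : Int × Int => 0 ≤ r.1 ∧ r.1 < R ∧ 0 ≤ r.2 ∧ r.2 < C ∧
    pvCellB arg r.1 r.2 ≠ 'X')]
  simp only [pvNbrs, pvOkB, decide_eq_true_eq]
  constructor
  · rintro (h | ⟨x, hx, hc, rfl⟩)
    · exact Or.inl h
    · exact Or.inr ⟨hx, hc⟩
  · rintro (h | ⟨hn, hok⟩)
    · exact Or.inl h
    · exact Or.inr ⟨p, hn, hok, rfl⟩

theorem mem_grow (arg : List String) (R C : Int) (reached : PySem.Set (Int × Int))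
    (p : Int × Int) :
    p ∈ pvGrowB arg R C reached
      ↔ p ∈ reached ∨ (pvOkB arg R C p = true ∧ ∃ q ∈ reached, p ∈ pvNbrs q) := by
  have aux : ∀ (L : List (Int × Int)) (s0 : PySem.Set (Int × Int)),
      p ∈ L.foldl (pvGrowStepB arg R C) s0
        ↔ p ∈ s0 ∨ ∃ q ∈ L, p ∈ pvNbrs q ∧ pvOkB arg R C p = true := by
    intro L
    induction L with
    | nil => simp
    | cons q L ih =>
      intro s0
      simp only [List.foldl_cons]
      rw [ih, mem_growStep]
      simp only [List.mem_cons]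
      constructor
      · rintro ((h | hq) | ⟨q', hq', hn⟩)
        · exact Or.inl h
        · exact Or.inr ⟨q, Or.inl rfl, hq⟩
        · exact Or.inr ⟨q', Or.inr hq', hn⟩
      · rintro (h | ⟨q', hq' | hq', hn⟩)
        · exact Or.inl (Or.inl h)
        · subst hq'; exact Or.inl (Or.inr hn)
        · exact Or.inr ⟨q', hq', hn⟩
  unfold pvGrowB
  rw [aux]
  constructor
  · rintro (h | ⟨q, hq, hn, hok⟩)
    · exact Or.inl h
    · exact Or.inr ⟨hok, q, hq, hn⟩
  · rintro (h | ⟨hok, q, hq, hn⟩)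
    · exact Or.inl h
    · exact Or.inr ⟨q, hq, hn, hok⟩

theorem stepFold_mem (arg : List String) (R C : Int) (ns : List (Int × Int)) :
    ∀ (st : List (Int × Int) × PySem.Set (Int × Int)) (p : Int × Int),
      (p ∈ (ns.foldl (pvStepF arg R C) st).2
        ↔ p ∈ st.2 ∨ (p ∈ ns ∧ pvOkB arg R C p = true)) ∧
      (p ∈ (ns.foldl (pvStepF arg R C) st).1
        ↔ p ∈ st.1 ∨ (p ∈ ns ∧ pvOkB arg R C p = true ∧ p ∉ st.2)) := by
  induction ns with
  | nil => simp
  | cons x ns ih =>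
    intro st p
    simp only [List.foldl_cons]
    by_cases hc : 0 ≤ x.1 ∧ x.1 < R ∧ 0 ≤ x.2 ∧ x.2 < C ∧ pvCellB arg x.1 x.2 ≠ 'X' ∧ x ∉ st.2
    · have hx : pvStepF arg R C st x = (st.1 ++ [x], PySem.Set.add st.2 x) := by
        simp only [pvStepF]
        rw [if_pos hc]
      have hokx : pvOkB arg R C x = true := by
        simp only [pvOkB, decide_eq_true_eq]; tauto
      rw [hx]
      obtain ⟨ih2, ih1⟩ := ih (st.1 ++ [x], PySem.Set.add st.2 x) p
      constructor
      · rw [ih2]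
        simp only [PySem.Set.mem_add, List.mem_cons]
        by_cases hpx : p = x
        · subst hpx; simp [hokx]
        · simp [hpx]
      · rw [ih1]
        simp only [PySem.Set.mem_add, List.mem_append, List.mem_singleton, List.mem_cons]
        by_cases hpx : p = x
        · subst hpx
          simp [hokx, hc.2.2.2.2.2]
        · simp [hpx]
    · have hx : pvStepF arg R C st x = st := by
        simp only [pvStepF]
        rw [if_neg hc]
      rw [hx]
      obtain ⟨ih2, ih1⟩ := ih st p
      have hside : ∀ pp : Int × Int, pp = x → pvOkB arg R C pp = true → pp ∈ st.2 := by
        rintro pp rfl hok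
        simp only [pvOkB, decide_eq_true_eq] at hok
        by_contra hv
        exact hc ⟨hok.1, hok.2.1, hok.2.2.1, hok.2.2.2.1, hok.2.2.2.2, hv⟩
      constructor
      · rw [ih2]
        simp only [List.mem_cons]
        constructor
        · tauto
        · rintro (h | ⟨hpx | hns, hok⟩)
          · exact Or.inl h
          · exact Or.inl (hside p hpx hok)
          · exact Or.inr ⟨hns, hok⟩
      · rw [ih1]
        simp only [List.mem_cons]
        constructor
        · tauto
        · rintro (h | ⟨hpx | hns, hok, hv⟩)
          · exact Or.inl h
          · exact absurd (hside p hpx hok) hv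
          · exact Or.inr ⟨hns, hok, hv⟩

theorem expandFold_mem (arg : List String) (R C : Int) (L : List (Int × Int)) :
    ∀ (st : List (Int × Int) × PySem.Set (Int × Int)) (p : Int × Int),
      (p ∈ (L.foldl (pvExpandF arg R C) st).2
        ↔ p ∈ st.2 ∨ (pvOkB arg R C p = true ∧ ∃ q ∈ L, p ∈ pvNbrs q)) ∧
      (p ∈ (L.foldl (pvExpandF arg R C) st).1
        ↔ p ∈ st.1 ∨ (p ∉ st.2 ∧ pvOkB arg R C p = true ∧ ∃ q ∈ L, p ∈ pvNbrs q)) := by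
  induction L with
  | nil => simp
  | cons q L ih =>
    intro st p
    simp only [List.foldl_cons]
    have hq : pvExpandF arg R C st q = (pvNbrs q).foldl (pvStepF arg R C) st := rfl
    obtain ⟨s2, s1⟩ := stepFold_mem arg R C (pvNbrs q) st p
    rw [← hq] at s2 s1
    obtain ⟨ih2, ih1⟩ := ih (pvExpandF arg R C st q) p
    constructor
    · rw [ih2, s2]
      simp only [List.mem_cons]
      constructor
      · rintro ((h | ⟨hn, hok⟩) | ⟨hok, q', hq', hn⟩)
        · exact Or.inl h
        · exact Or.inr ⟨hok, q, Or.inl rfl, hn⟩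
        · exact Or.inr ⟨hok, q', Or.inr hq', hn⟩
      · rintro (h | ⟨hok, q', hq' | hq', hn⟩)
        · exact Or.inl (Or.inl h)
        · subst hq'; exact Or.inl (Or.inr ⟨hn, hok⟩)
        · exact Or.inr ⟨hok, q', hq', hn⟩
    · rw [ih1, s1, s2]
      simp only [List.mem_cons]
      constructor
      · rintro ((h | ⟨hn, hok, hv⟩) | ⟨hnv, hok, q', hq', hn⟩)
        · exact Or.inl h
        · exact Or.inr ⟨hv, hok, q, Or.inl rfl, hn⟩
        · push_neg at hnv
          exact Or.inr ⟨hnv.1, hok, q', Or.inr hq', hn⟩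
      · rintro (h | ⟨hv, hok, q', hq' | hq', hn⟩)
        · exact Or.inl (Or.inl h)
        · subst hq'
          exact Or.inl (Or.inr ⟨hn, hok, hv⟩)
        · by_cases hq0 : p ∈ pvNbrs q ∧ pvOkB arg R C p = true
          · exact Or.inl (Or.inr ⟨hq0.1, hq0.2, hv⟩)
          · refine Or.inr ⟨?_, hok, q', hq', hn⟩
            push_neg
            exact ⟨hv, fun hnq => absurd ⟨hnq, hok⟩ hq0⟩

-- ---- A's per-source BFS computes the first hit level of its singleton seed ----

theorem pvF_char (arg : List String) (R C : Int) (t : Char) (s : Int × Int)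
    (hs : 0 ≤ s.1 ∧ s.1 < R ∧ 0 ≤ s.2 ∧ s.2 < C) :
    ∀ (n k : Nat) (frontier : List (Int × Int)) (seen : PySem.Set (Int × Int)),
    (∀ p, (p ∈ seen ∨ p = s) ↔ pvReach arg R C [s] k p = true) →
    (∀ p, p ∈ frontier → pvReach arg R C [s] k p = true) →
    (∀ q, pvReach arg R C [s] k q = true → q ∉ frontier →
       ∀ p, p ∈ pvNbrs q → pvOkB arg R C p = true → pvReach arg R C [s] k p = true) →
    (∀ p, pvReach arg R C [s] k p = true → pvCellB arg p.1 p.2 = t → p ∈ frontier) →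
    pvFrontA arg R C t n frontier seen (k : Int) = pvFH arg R C t [s] k n := by
  intro n
  induction n with
  | zero => intros; rfl
  | succ n ih =>
    intro k frontier seen h2 hf h4 h6
    have hiff : (frontier.any (fun p => pvCellB arg p.1 p.2 == t)) = true
        ↔ pvHit arg R C t [s] k = true := by
      constructor
      · intro hA
        simp only [List.any_eq_true, beq_iff_eq] at hA
        obtain ⟨p, hp, hc⟩ := hA
        have hr := hf p hp
        have hg := pvReach_inGrid arg R C [s]
          (by intro q hq; simp only [List.mem_singleton] at hq; subst hq; exact hs) k p hr
        simp only [pvHit, List.any_eq_true]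
        exact ⟨p, (mem_cells arg R C t p).2 ⟨hg.1, hg.2.1, hg.2.2.1, hg.2.2.2, hc⟩, hr⟩
      · intro hH
        simp only [pvHit, List.any_eq_true] at hH
        obtain ⟨p, hpt, hpr⟩ := hH
        have hc := ((mem_cells arg R C t p).1 hpt).2.2.2.2
        simp only [List.any_eq_true, beq_iff_eq]
        exact ⟨p, h6 p hpr hc, hc⟩
    by_cases hemp : frontier = []
    · subst hemp
      have hnohit : pvHit arg R C t [s] k = false := by
        rcases hH : pvHit arg R C t [s] k with _ | _
        · rfl
        · have := hiff.2 hH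
          simp at this
      have hstable : ∀ p, pvReach arg R C [s] (k + 1) p = pvReach arg R C [s] k p := by
        intro p
        rw [Bool.eq_iff_iff]
        constructor
        · intro h
          rcases (pvReach_step_iff arg R C [s] k p).1 h with h | ⟨hok, q, hqn, hqr⟩
          · exact h
          · exact h4 q hqr (List.not_mem_nil) p ((pvNbrs_symm q p).1 hqn) hok
        · exact pvReach_mono arg R C [s] k p
      rw [pvFH_none_of_stable arg R C t [s] k hstable hnohit (n + 1)]
      simp [pvFrontA]
    · by_cases hA : (frontier.any (fun p => pvCellB arg p.1 p.2 == t)) = true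
      · have hH := hiff.1 hA
        simp [pvFrontA, hemp, hA, pvFH, hH]
      · have hnohit : pvHit arg R C t [s] k = false := by
          rcases hH : pvHit arg R C t [s] k with _ | _
          · rfl
          · exact absurd (hiff.2 hH) hA
        have hAf : ∀ p ∈ frontier, pvCellB arg p.1 p.2 ≠ t := by
          intro p hp hc
          exact hA (by simp only [List.any_eq_true, beq_iff_eq]; exact ⟨p, hp, hc⟩)
        set st := frontier.foldl (pvExpandF arg R C) ([], seen) with hstdef
        have E2 : ∀ p, p ∈ st.2 ↔ p ∈ seen ∨
            (pvOkB arg R C p = true ∧ ∃ q ∈ frontier, p ∈ pvNbrs q) :=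
          fun p => (expandFold_mem arg R C frontier ([], seen) p).1
        have E1 : ∀ p, p ∈ st.1 ↔
            (p ∉ seen ∧ pvOkB arg R C p = true ∧ ∃ q ∈ frontier, p ∈ pvNbrs q) := by
          intro p
          have := (expandFold_mem arg R C frontier ([], seen) p).2
          simpa using this
        have inv2 : ∀ p, (p ∈ st.2 ∨ p = s) ↔ pvReach arg R C [s] (k + 1) p = true := by
          intro p
          constructor
          · rintro (hp | hps)
            · rcases (E2 p).1 hp with hp | ⟨hok, q, hq, hn⟩
              · exact pvReach_mono arg R C [s] k p ((h2 p).1 (Or.inl hp))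
              · exact (pvReach_step_iff arg R C [s] k p).2
                  (Or.inr ⟨hok, q, (pvNbrs_symm p q).1 hn, hf q hq⟩)
            · exact pvReach_mono arg R C [s] k p ((h2 p).1 (Or.inr hps))
          · intro hr
            by_cases hk : pvReach arg R C [s] k p = true
            · rcases (h2 p).2 hk with hp | rfl
              · exact Or.inl ((E2 p).2 (Or.inl hp))
              · exact Or.inr rfl
            · rcases (pvReach_step_iff arg R C [s] k p).1 hr with hk' | ⟨hok, q, hqn, hqr⟩
              · exact absurd hk' hk
              · by_cases hqf : q ∈ frontier
                · exact Or.inl ((E2 p).2 (Or.inr ⟨hok, q, hqf, (pvNbrs_symm q p).1 hqn⟩))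
                · exact absurd (h4 q hqr hqf p ((pvNbrs_symm q p).1 hqn) hok) hk
        have invf : ∀ p, p ∈ st.1 → pvReach arg R C [s] (k + 1) p = true := by
          intro p hp
          obtain ⟨_, hok, q, hqf, hn⟩ := (E1 p).1 hp
          exact (pvReach_step_iff arg R C [s] k p).2
            (Or.inr ⟨hok, q, (pvNbrs_symm p q).1 hn, hf q hqf⟩)
        have inv4 : ∀ q, pvReach arg R C [s] (k + 1) q = true → q ∉ st.1 →
            ∀ p, p ∈ pvNbrs q → pvOkB arg R C p = true →
              pvReach arg R C [s] (k + 1) p = true := by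
          intro q hq hqn p hpn hok
          by_cases hk : pvReach arg R C [s] k q = true
          · by_cases hqf : q ∈ frontier
            · exact (pvReach_step_iff arg R C [s] k p).2
                (Or.inr ⟨hok, q, (pvNbrs_symm p q).1 hpn, hk⟩)
            · exact pvReach_mono arg R C [s] k p (h4 q hk hqf p hpn hok)
          · rcases (pvReach_step_iff arg R C [s] k q).1 hq with hk' | ⟨hokq, q', hq'n, hq'r⟩
            · exact absurd hk' hk
            · have hqseen : q ∉ seen := fun hqs => hk ((h2 q).1 (Or.inl hqs))
              by_cases hq'f : q' ∈ frontier
              · exact absurd ((E1 q).2 ⟨hqseen, hokq, q', hq'f, (pvNbrs_symm q' q).1 hq'n⟩) hqn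
              · exact absurd (h4 q' hq'r hq'f q ((pvNbrs_symm q' q).1 hq'n) hokq) hk
        have inv6 : ∀ p, pvReach arg R C [s] (k + 1) p = true →
            pvCellB arg p.1 p.2 = t → p ∈ st.1 := by
          intro p hp hc
          by_cases hk : pvReach arg R C [s] k p = true
          · exact absurd hc (hAf p (h6 p hk hc))
          · rcases (pvReach_step_iff arg R C [s] k p).1 hp with hk' | ⟨hok, q, hqn, hqr⟩
            · exact absurd hk' hk
            · have hpseen : p ∉ seen := fun hps => hk ((h2 p).1 (Or.inl hps))
              by_cases hqf : q ∈ frontier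
              · exact (E1 p).2 ⟨hpseen, hok, q, hqf, (pvNbrs_symm q p).1 hqn⟩
              · exact absurd (h4 q hqr hqf p ((pvNbrs_symm q p).1 hqn) hok) hk
        have hrec := ih (k + 1) st.1 st.2 inv2 invf inv4 inv6
        have hcast : ((k : Int) + 1) = (((k + 1 : Nat)) : Int) := by push_cast; ring
        calc pvFrontA arg R C t (n + 1) frontier seen (k : Int)
            = pvFrontA arg R C t n st.1 st.2 ((k : Int) + 1) := by
              simp only [pvFrontA, hemp, if_false, hA]
              rfl
          _ = pvFH arg R C t [s] (k + 1) n := by rw [hcast]; exact hrec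
          _ = pvFH arg R C t [s] k (n + 1) := by simp [pvFH, hnohit]

-- ---- B's multi-source fixed-point loop computes the first hit level of its seed set ----

theorem pvG_char (arg : List String) (R C : Int) (t : Char) (S : List (Int × Int)) :
    ∀ (n k : Nat) (reached : PySem.Set (Int × Int)),
    (∀ p, p ∈ reached ↔ pvReach arg R C S k p = true) →
    pvLoopB arg R C (pvCellsB arg R C t) n reached (k : Int) = pvFH arg R C t S k n := by
  intro n
  induction n with
  | zero => intros; rfl
  | succ n ih =>
    intro k reached hinv
    have hiff : (PySem.Set.inter reached (pvCellsB arg R C t) ≠ [])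
        ↔ pvHit arg R C t S k = true := by
      rw [pvHit, List.any_eq_true]
      constructor
      · intro hne
        obtain ⟨x, hx⟩ := List.exists_mem_of_ne_nil _ hne
        rw [PySem.Set.mem_inter] at hx
        exact ⟨x, hx.2, (hinv x).1 hx.1⟩
      · rintro ⟨p, hpt, hpr⟩ hnil
        have hmem : p ∈ PySem.Set.inter reached (pvCellsB arg R C t) := by
          rw [PySem.Set.mem_inter]
          exact ⟨(hinv p).2 hpr, hpt⟩
        rw [hnil] at hmem
        exact List.not_mem_nil hmem
    have hnxt : ∀ p, p ∈ pvGrowB arg R C reached ↔ pvReach arg R C S (k + 1) p = true := by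
      intro p
      rw [mem_grow, pvReach_step_iff]
      constructor
      · rintro (h | ⟨hok, q, hq, hn⟩)
        · exact Or.inl ((hinv p).1 h)
        · exact Or.inr ⟨hok, q, (pvNbrs_symm p q).1 hn, (hinv q).1 hq⟩
      · rintro (h | ⟨hok, q, hqn, hqr⟩)
        · exact Or.inl ((hinv p).2 h)
        · exact Or.inr ⟨hok, q, (hinv q).2 hqr, (pvNbrs_symm q p).1 hqn⟩
    by_cases hh : pvHit arg R C t S k = true
    · simp only [pvLoopB, pvFH, hh, if_true]
      rw [if_pos (hiff.2 hh)]
    · have hne : ¬ (PySem.Set.inter reached (pvCellsB arg R C t) ≠ []) :=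
        fun h => hh (hiff.1 h)
      have hhf : pvHit arg R C t S k = false := by
        rcases hH : pvHit arg R C t S k with _ | _
        · rfl
        · exact absurd hH hh
      by_cases heq : PySem.Set.equal (pvGrowB arg R C reached) reached = true
      · have hstable : ∀ p, pvReach arg R C S (k + 1) p = pvReach arg R C S k p := by
          intro p
          rw [Bool.eq_iff_iff]
          constructor
          · intro h
            exact (hinv p).1 (((PySem.Set.equal_iff _ _).1 heq p).1 ((hnxt p).2 h))
          · exact pvReach_mono arg R C S k p
        rw [pvFH_none_of_stable arg R C t S k hstable hhf (n + 1)]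
        simp only [pvLoopB]
        rw [if_neg hne, if_pos heq]
      · have hrec := ih (k + 1) (pvGrowB arg R C reached) hnxt
        have hcast : ((k : Int) + 1) = (((k + 1 : Nat)) : Int) := by push_cast; ring
        calc pvLoopB arg R C (pvCellsB arg R C t) (n + 1) reached (k : Int)
            = pvLoopB arg R C (pvCellsB arg R C t) n (pvGrowB arg R C reached)
                ((k : Int) + 1) := by
              simp only [pvLoopB]
              rw [if_neg hne, if_neg heq]
          _ = pvFH arg R C t S (k + 1) n := by rw [hcast]; exact hrec
          _ = pvFH arg R C t S k (n + 1) := by simp [pvFH, hhf]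

-- ---- assembling the legs ----

theorem pvFH_nil (arg : List String) (R C : Int) (t : Char) (n k : Nat) :
    pvFH arg R C t [] k n = none := by
  apply pvFH_none_of_nohit
  intro j _
  simp [pvHit, pvReach_nil, List.any_eq_true]

theorem foldl_minO_FH (arg : List String) (R C : Int) (t : Char) (n : Nat) :
    ∀ (ss : List (Int × Int)) (acc : Option Int),
      ss.foldl (fun a s => pvMinO a (pvFH arg R C t [s] 0 n)) acc
        = pvMinO acc (pvFH arg R C t ss 0 n) := by
  intro ss
  induction ss with
  | nil => intro acc; rw [pvFH_nil, pvMinO_none_right]; rfl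
  | cons s ss ih =>
    intro acc
    simp only [List.foldl_cons]
    rw [ih, pvMinO_assoc, ← pvFH_append]
    rfl

theorem legB_eq (arg : List String) (R C : Int) (fuel : Nat) (src dst : Char) :
    pvStepsB arg R C fuel src dst
      = pvFH arg R C dst (pvCellsB arg R C src) 0 fuel := by
  unfold pvStepsB
  rw [show (0 : Int) = ((0 : Nat) : Int) from rfl]
  apply pvG_char
  intro p
  simp [pvReach]

theorem legA_eq (arg : List String) (R C : Int) (fuel : Nat) (src t : Char) :
    (PySem.List.pyRange 0 R 1).foldl (fun a i =>
      (PySem.List.pyRange 0 C 1).foldl (fun a j =>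
        if pvCellB arg i j = src then pvMinO a (pvFrontA arg R C t fuel [(i, j)] [] 0) else a)
        a) none
    = pvFH arg R C t (pvCellsB arg R C src) 0 fuel := by
  have hstep1 : (PySem.List.pyRange 0 R 1).foldl (fun a i =>
      (PySem.List.pyRange 0 C 1).foldl (fun a j =>
        if pvCellB arg i j = src then pvMinO a (pvFrontA arg R C t fuel [(i, j)] [] 0) else a)
        a) none
      = (PySem.List.pyRange 0 R 1).foldl (fun a i =>
      (PySem.List.pyRange 0 C 1).foldl (fun a j =>
        if pvCellB arg i j = src then pvMinO a (pvFH arg R C t [(i, j)] 0 fuel) else a)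
        a) none := by
    apply PySem.List.foldl_congr_mem
    intro a i hi
    apply PySem.List.foldl_congr_mem
    intro a' j hj
    by_cases hc : pvCellB arg i j = src
    · rw [if_pos hc, if_pos hc]
      congr 1
      rw [show (0 : Int) = ((0 : Nat) : Int) from rfl]
      rw [PySem.List.mem_pyRange_one] at hi hj
      apply pvF_char arg R C t (i, j) ⟨hi.1, hi.2, hj.1, hj.2⟩
      · intro p; simp [pvReach]
      · intro p hp; simp only [List.mem_singleton] at hp; subst hp; simp [pvReach]
      · intro q hq hqn
        simp only [pvReach, decide_eq_true_eq, List.mem_singleton] at hq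
        exact absurd (by simp [hq]) hqn
      · intro p hp _
        simp only [pvReach, decide_eq_true_eq, List.mem_singleton] at hp
        simp [hp]
    · rw [if_neg hc, if_neg hc]
  rw [hstep1]
  have hstep2 : (PySem.List.pyRange 0 R 1).foldl (fun a i =>
      (PySem.List.pyRange 0 C 1).foldl (fun a j =>
        if pvCellB arg i j = src then pvMinO a (pvFH arg R C t [(i, j)] 0 fuel) else a)
        a) none
      = ((PySem.List.pyRange 0 R 1).flatMap (fun i =>
          ((PySem.List.pyRange 0 C 1).filter (fun j => pvCellB arg i j == src)).map
            (fun j => ((i : Int), j)))).foldl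
          (fun a s => pvMinO a (pvFH arg R C t [s] 0 fuel)) none := by
    rw [List.foldl_flatMap]
    apply PySem.List.foldl_congr_mem
    intro a i _
    rw [List.foldl_map, PySem.List.foldl_ite_eq_foldl_filter]
    simp only [Bool.beq_eq_decide_eq]
  rw [hstep2, foldl_minO_FH]
  show pvFH arg R C t _ 0 fuel = _
  apply pvFH_congr
  intro p
  rw [mem_cells]
  simp only [List.mem_flatMap, List.mem_map, List.mem_filter, PySem.List.mem_pyRange_one,
    beq_iff_eq]
  constructor
  · rintro ⟨i, hi, j, ⟨hj, hc⟩, rfl⟩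
    exact ⟨hi.1, hi.2, hj.1, hj.2, hc⟩
  · rintro ⟨h1, h2, h3, h4, h5⟩
    exact ⟨p.1, ⟨h1, h2⟩, p.2, ⟨⟨h3, h4⟩, h5⟩, rfl⟩

-- ---- final assembly (A-port plumbing reused from the A-bridge) ----

theorem pvStepPair (c1 c2 : Prop) [Decidable c1] [Decidable c2] (u v : Option Int)
    (dt : Option Int × Option Int) :
    (let dt1 := if c1 then (pvMinO dt.1 u, dt.2) else dt
     if c2 then (dt1.1, pvMinO dt1.2 v) else dt1)
      = (if c1 then pvMinO dt.1 u else dt.1, if c2 then pvMinO dt.2 v else dt.2) := by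
  split_ifs <;> simp

theorem pvC_eq (arg : List String) :
    (((PySem.List.pyGet? (arg.map (·.toList)) 0).getD []).length : Int)
      = PySem.Str.len ((PySem.List.pyGet? arg 0).getD "") := by
  rw [pyGet?_map_toList]
  cases PySem.List.pyGet? arg 0 <;> simp [PySem.Str.len]

theorem pvDoubleFold_split (lR lC : List Int) (f g : Option Int → Int → Int → Option Int) :
    lR.foldl (fun dt i => lC.foldl (fun dt j => (f dt.1 i j, g dt.2 i j)) dt)
      ((none, none) : Option Int × Option Int)
      = (lR.foldl (fun a i => lC.foldl (fun a j => f a i j) a) none,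
         lR.foldl (fun a i => lC.foldl (fun a j => g a i j) a) none) := by
  have h : ∀ (dt : Option Int × Option Int) (i : Int),
      lC.foldl (fun dt j => (f dt.1 i j, g dt.2 i j)) dt
        = (lC.foldl (fun a j => f a i j) dt.1, lC.foldl (fun a j => g a i j) dt.2) := by
    intro dt i
    rw [← Prod.mk.eta (p := dt)]
    exact PySem.List.foldl_prod_mk (f := fun a j => f a i j) (g := fun a j => g a i j) lC dt.1 dt.2
  simp only [h]
  exact PySem.List.foldl_prod_mk (f := fun a i => lC.foldl (fun a j => f a i j) a)
    (g := fun a i => lC.foldl (fun a j => g a i j) a) lR none none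

theorem solution_eq (arg : List String) : solution arg = solution_alt arg := by
  unfold solution solution_alt
  simp only [List.length_map, pvC_eq, pvCell_eq, pvBfs_eq', pvStepPair]
  rw [pvDoubleFold_split (PySem.List.pyRange 0 arg.length 1)
    (PySem.List.pyRange 0 (PySem.Str.len ((PySem.List.pyGet? arg 0).getD "")) 1)
    (fun a i j => if pvCellB arg i j = 'S' then pvMinO a (pvFrontA arg (arg.length)
      (PySem.Str.len ((PySem.List.pyGet? arg 0).getD "")) 'L'
      ((arg.length * PySem.Str.len ((PySem.List.pyGet? arg 0).getD "")).toNat + 2) [(i, j)] [] 0) else a)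
    (fun a i j => if pvCellB arg i j = 'L' then pvMinO a (pvFrontA arg (arg.length)
      (PySem.Str.len ((PySem.List.pyGet? arg 0).getD "")) 'E'
      ((arg.length * PySem.Str.len ((PySem.List.pyGet? arg 0).getD "")).toNat + 2) [(i, j)] [] 0) else a)]
  rw [legA_eq, legA_eq, legB_eq, legB_eq]
  rcases pvFH arg (arg.length) (PySem.Str.len ((PySem.List.pyGet? arg 0).getD "")) 'L'
      (pvCellsB arg (arg.length) (PySem.Str.len ((PySem.List.pyGet? arg 0).getD "")) 'S') 0
      ((arg.length * PySem.Str.len ((PySem.List.pyGet? arg 0).getD "")).toNat + 2) with _ | a <;>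
    rcases pvFH arg (arg.length) (PySem.Str.len ((PySem.List.pyGet? arg 0).getD "")) 'E'
      (pvCellsB arg (arg.length) (PySem.Str.len ((PySem.List.pyGet? arg 0).getD "")) 'L') 0
      ((arg.length * PySem.Str.len ((PySem.List.pyGet? arg 0).getD "")).toNat + 2) with _ | b <;> rfl

-- ===== VERDICT (by name: the statement is the Claim_ definition above) =====
theorem solution_spec : Claim_equal_solution := by
  intro arg _ _
  show solution arg = solution_alt arg
  exact solution_eq arg
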